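-- pv_equiv track=rewrite | github.com/gokulganesh189/Learning-Docs | Practice/test/permutation.py | permutations_lexicographic
-- ===== SOURCE A (Python) =====
-- def permutations_lexicographic(s):
--     s = ''.join(sorted(s))          # ensure lexicographic order
--     n = len(s)
--     used = [False] * n
--     cur = []
--     result = []
--
--     def backtrack():
--         if len(cur) == n:
--             result.append(''.join(cur))
--             return
--         for i in range(n):
--             if used[i]:
--                 continue
--             used[i] = True
--             cur.append(s[i])
--             backtrack()
--             cur.pop()
--             used[i] = False
--
--     backtrack()
--     return result
-- ===== SOURCE B (Python) =====
-- def permutations_lexicographic(s):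
--     chars = sorted(s)
--     n = len(chars)
--
--     def fact(k):
--         return 1 if k == 0 else k * fact(k - 1)
--
--     result = []
--     for i in range(fact(n)):
--         remaining = chars[:]
--         picked = []
--         for k in range(n - 1, -1, -1):
--             f = fact(k)
--             picked.append(remaining.pop(i // f))
--             i %= f
--         result.append(''.join(picked))
--     return result
-- ===== Notes on version B (the rewrite author's own statement) =====
-- stated objective: alternative
-- what changed: Replaces recursive backtracking with a used-array by direct unranking: each index i in range(n!) is decoded in the factorial number system, popping characters from the sorted remainder, producing the same n! strings in the same order.
import Mathlib
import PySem

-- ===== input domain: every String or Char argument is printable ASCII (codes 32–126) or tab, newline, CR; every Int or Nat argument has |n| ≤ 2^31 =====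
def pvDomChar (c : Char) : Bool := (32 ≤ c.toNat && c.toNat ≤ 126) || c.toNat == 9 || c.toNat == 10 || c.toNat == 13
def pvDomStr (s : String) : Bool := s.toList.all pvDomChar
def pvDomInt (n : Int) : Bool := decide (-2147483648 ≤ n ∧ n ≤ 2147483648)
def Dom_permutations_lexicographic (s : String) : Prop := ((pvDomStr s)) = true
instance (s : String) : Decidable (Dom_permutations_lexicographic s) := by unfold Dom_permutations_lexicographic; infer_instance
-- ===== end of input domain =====

-- B replaces A's recursive backtracking with factorial-number-system unranking of each index 0..n!-1 (alternative decomposition, same output).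

-- ===== PORT A =====
-- fuel-indexed transliteration of A's nested `backtrack`; fuel = n - len(cur), the 0-fuel branch is unreachable
def backtrackA (s : List Char) (n : Nat) : Nat → List Bool → List Char → List String
  | fuel, used, cur =>
    if cur.length = n then [String.ofList cur]
    else
      match fuel with
      | 0 => []
      | fuel' + 1 =>
        (List.range n).foldl
          (fun acc i =>
            if used.getD i false then acc
            else acc ++ backtrackA s n fuel' (used.set i true) (cur ++ [s.getD i ' ']))
          []

def permutations_lexicographic (s : String) : List String :=
  let cs := PySem.List.sorted s.toList id false
  let n := cs.length
  backtrackA cs n n (List.replicate n false) []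

-- ===== PORT B =====
def factB : Nat → Nat
  | 0 => 1
  | k + 1 => (k + 1) * factB k

-- the inner `for k in range(n-1, -1, -1)` loop of Source B, recursing on k
def unrankB : Nat → List Char → Nat → List Char
  | 0, _, _ => []
  | k + 1, rem, i =>
    let f := factB k
    rem.getD (i / f) ' ' :: unrankB k (rem.eraseIdx (i / f)) (i % f)

def permutations_lexicographic_alt (s : String) : List String :=
  let cs := PySem.List.sorted s.toList id false
  let n := cs.length
  (List.range (factB n)).map (fun i => String.ofList (unrankB n cs i))

-- ===== PRECONDITION & SPEC =====
def Spec_permutations_lexicographic (s : String) (out : List String) : Prop := out = permutations_lexicographic_alt s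
instance (s : String) (out : List String) : Decidable (Spec_permutations_lexicographic s out) := by unfold Spec_permutations_lexicographic; infer_instance

-- ===== CLAIM (what is proved, stated in full; the proofs are below) =====
def Claim_equal_permutations_lexicographic : Prop := ∀ (s : String), Dom_permutations_lexicographic s → Spec_permutations_lexicographic s (permutations_lexicographic s)

-- ===== LEMMAS AND PROOFS =====

-- the characters at the not-yet-used positions, in index order
def unusedP : List Char → List Bool → List Char
  | [], _ => []
  | _ :: _, [] => []
  | c :: cs, b :: bs => if b then unusedP cs bs else c :: unusedP cs bs

-- common specification: all permutations of l (length-fuel indexed), lexicographic recursion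
def permsF : Nat → List Char → List (List Char)
  | 0, _ => [[]]
  | k + 1, l =>
    (List.range (k + 1)).flatMap (fun j => (permsF k (l.eraseIdx j)).map (l.getD j ' ' :: ·))

theorem factB_pos (k : Nat) : 0 < factB k := by
  induction k with
  | zero => simp [factB]
  | succ k ih => simp [factB]; positivity

theorem range_mul (a b : Nat) :
    List.range (a * b) = (List.range a).flatMap (fun q => (List.range b).map (fun r => q * b + r)) := by
  induction a with
  | zero => simp
  | succ a ih =>
    rw [Nat.succ_mul, List.range_add, List.range_succ, List.flatMap_append, ih]
    simp

theorem unrank_eq_perms (k : Nat) (l : List Char) (hl : l.length = k) :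
    (List.range (factB k)).map (unrankB k l) = permsF k l := by
  induction k generalizing l with
  | zero => simp [factB, List.range_succ, unrankB, permsF]
  | succ k ih =>
    have hf := factB_pos k
    rw [show factB (k+1) = (k+1) * factB k from rfl, range_mul, List.map_flatMap, permsF]
    apply List.flatMap_congr
    intro j hj
    rw [List.mem_range] at hj
    rw [List.map_map]
    have he : (l.eraseIdx j).length = k := by
      rw [List.length_eraseIdx_of_lt (by omega)]; omega
    rw [← ih (l.eraseIdx j) he, List.map_map]
    apply List.map_congr_left
    intro r hr
    rw [List.mem_range] at hr
    have hd : (j * factB k + r) / factB k = j := by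
      rw [Nat.mul_comm j (factB k), Nat.mul_add_div hf, Nat.div_eq_of_lt hr]
      omega
    have hm : (j * factB k + r) % factB k = r := by
      simp [Nat.mod_eq_of_lt hr]
    simp [unrankB, hd, hm]

theorem unusedP_replicate (l : List Char) : unusedP l (List.replicate l.length false) = l := by
  induction l with
  | nil => rfl
  | cons c cs ih => simp [unusedP, List.replicate, ih]

theorem unusedP_set_len (s : List Char) (used : List Bool) (i : Nat)
    (h : used.length = s.length) (hi : i < s.length) (hf : used.getD i false = false) :
    (unusedP s (used.set i true)).length + 1 = (unusedP s used).length := by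
  induction s generalizing used i with
  | nil => simp at hi
  | cons c cs ih =>
    cases used with
    | nil => simp at h
    | cons b bs =>
      cases i with
      | zero =>
        simp at hf
        simp [hf, unusedP]
      | succ i =>
        simp at h hf
        have := ih bs i h (by simpa using hi) hf
        cases b <;> simp [unusedP, this]

theorem unused_flatMap {α : Type} (s : List Char) (used : List Bool)
    (f : List Char → Char → List α) (h : used.length = s.length) :
    (List.range s.length).flatMap
        (fun i => if used.getD i false then []
                  else f (unusedP s (used.set i true)) (s.getD i ' '))
      = (List.range (unusedP s used).length).flatMap
          (fun j => f ((unusedP s used).eraseIdx j) ((unusedP s used).getD j ' ')) := by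
  induction s generalizing used f with
  | nil =>
    have : used = [] := List.length_eq_zero_iff.mp h
    simp [this, unusedP]
  | cons c cs ih =>
    cases used with
    | nil => simp at h
    | cons b bs =>
      simp at h
      have hT : ∀ X, unusedP (c :: cs) (true :: X) = unusedP cs X := fun X => by simp [unusedP]
      have hF : ∀ X, unusedP (c :: cs) (false :: X) = c :: unusedP cs X := fun X => by simp [unusedP]
      cases b with
      | true =>
        rw [hT bs]
        simp only [List.length_cons, List.range_succ_eq_map, List.flatMap_cons, List.flatMap_map,
          List.getD_cons_zero, List.getD_cons_succ, List.set_cons_succ, if_true, List.nil_append,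
          hT]
        exact ih bs f h
      | false =>
        rw [hF bs]
        simp only [List.length_cons, List.range_succ_eq_map, List.flatMap_cons, List.flatMap_map,
          List.getD_cons_zero, List.getD_cons_succ, List.set_cons_succ,
          List.eraseIdx_cons_zero, List.eraseIdx_cons_succ, hF]
        congr 1
        exact ih bs (fun l ch => f (c :: l) ch) h

theorem backtrackA_eq (fuel : Nat) (s : List Char) (used : List Bool) (cur : List Char)
    (h : used.length = s.length)
    (hc : cur.length + (unusedP s used).length = s.length)
    (hf : (unusedP s used).length ≤ fuel) :
    backtrackA s s.length fuel used cur
      = (permsF (unusedP s used).length (unusedP s used)).map (fun t => String.ofList (cur ++ t)) := by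
  induction fuel generalizing used cur with
  | zero =>
    have h0 : (unusedP s used).length = 0 := Nat.le_zero.mp hf
    have hnil : unusedP s used = [] := List.length_eq_zero_iff.mp h0
    have hcc : cur.length = s.length := by omega
    rw [backtrackA]
    simp [hcc, hnil, permsF]
  | succ fuel ih =>
    by_cases hz : (unusedP s used).length = 0
    · have hnil : unusedP s used = [] := List.length_eq_zero_iff.mp hz
      have hcc : cur.length = s.length := by omega
      rw [backtrackA]
      simp [hcc, hnil, permsF]
    · obtain ⟨m, hm⟩ : ∃ m, (unusedP s used).length = m + 1 :=
        ⟨(unusedP s used).length - 1, by omega⟩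
      have hcc : ¬ cur.length = s.length := by omega
      rw [backtrackA]
      simp only [if_neg hcc]
      have hbody : (fun (acc : List String) i =>
          if used.getD i false then acc
          else acc ++ backtrackA s s.length fuel (used.set i true) (cur ++ [s.getD i ' ']))
        = (fun acc i => acc ++ (if used.getD i false then []
          else backtrackA s s.length fuel (used.set i true) (cur ++ [s.getD i ' ']))) := by
        funext acc i
        split_ifs <;> simp
      rw [hbody, PySem.List.foldl_append_eq_flatMap, List.nil_append]
      rw [List.flatMap_congr (g := fun i => if used.getD i false then []
            else ((permsF (unusedP s (used.set i true)).length (unusedP s (used.set i true))).map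
              (fun t => String.ofList ((cur ++ [s.getD i ' ']) ++ t))))
        (by
          intro i hiR
          rw [List.mem_range] at hiR
          by_cases hu : used.getD i false = true
          · simp only [hu, if_true]
          · simp only [if_neg hu]
            have hlen : (unusedP s (used.set i true)).length + 1 = (unusedP s used).length :=
              unusedP_set_len s used i h hiR (by simpa using hu)
            exact ih (used.set i true) (cur ++ [s.getD i ' ']) (by simp [h])
              (by simp; omega) (by omega))]
      rw [unused_flatMap s used
        (fun l ch => (permsF l.length l).map (fun t => String.ofList ((cur ++ [ch]) ++ t))) h]
      rw [hm, permsF, List.map_flatMap]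
      apply List.flatMap_congr
      intro j hj
      rw [List.mem_range] at hj
      have he : ((unusedP s used).eraseIdx j).length = m := by
        rw [List.length_eraseIdx_of_lt (by omega)]; omega
      rw [he, List.map_map]
      simp

-- ===== VERDICT (by name: the statement is the Claim_ definition above) =====
theorem permutations_lexicographic_spec : Claim_equal_permutations_lexicographic := by
  intro s _
  unfold Spec_permutations_lexicographic permutations_lexicographic permutations_lexicographic_alt
  simp only []
  set cs := PySem.List.sorted s.toList id false with hcs
  have hu : unusedP cs (List.replicate cs.length false) = cs := unusedP_replicate cs
  rw [backtrackA_eq cs.length cs (List.replicate cs.length false) []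
      (by simp) (by simp [hu]) (by simp [hu])]
  rw [hu, ← unrank_eq_perms cs.length cs rfl, List.map_map]
  simp [Function.comp]
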